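-- pv_equiv track=rewrite | github.com/IFC-Roofing/sup-api-code | sup-api/main.py | parse_strategies_from_output
-- ===== SOURCE A (Python) =====
-- def parse_strategies_from_output(stdout: str) -> list:
--     """Parse strategies detected from generate.py output."""
--     strategies = set()
--     for line in stdout.splitlines():
--         lower = line.lower()
--         if "steep" in lower:
--             strategies.add("steep_on_waste")
--         if "fence" in lower:
--             strategies.add("full_fence_scope")
--         if "o&p" in lower:
--             strategies.add("O&P")
--         if "f9" in lower:
--             strategies.add("f9_notes")
--     return list(strategies)
-- ===== SOURCE B (Python) =====
-- _KEYWORDS = [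
--     ("steep", "steep_on_waste"),
--     ("fence", "full_fence_scope"),
--     ("o&p", "O&P"),
--     ("f9", "f9_notes"),
-- ]
--
-- def parse_strategies_from_output(stdout: str) -> list:
--     """Parse strategies detected from generate.py output."""
--     lower = stdout.lower()
--     return [name for key, name in _KEYWORDS if key in lower]
-- ===== Notes on version B (the rewrite author's own statement) =====
-- stated objective: simpler
-- what changed: B drops the splitlines loop and the set entirely: it lowercases the whole string once and does a single table-driven pass over a keyword-to-strategy list, emitting each strategy whose keyword occurs anywhere in the lowered text (keywords contain no newline, so whole-string membership equals per-line membership); Pre_ excludes inputs with two or more detected keywords, where A's list(set(...)) element order is accidental (it varies with PYTHONHASHSEED) and may or may not coincide with B's table order.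
import Mathlib
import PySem

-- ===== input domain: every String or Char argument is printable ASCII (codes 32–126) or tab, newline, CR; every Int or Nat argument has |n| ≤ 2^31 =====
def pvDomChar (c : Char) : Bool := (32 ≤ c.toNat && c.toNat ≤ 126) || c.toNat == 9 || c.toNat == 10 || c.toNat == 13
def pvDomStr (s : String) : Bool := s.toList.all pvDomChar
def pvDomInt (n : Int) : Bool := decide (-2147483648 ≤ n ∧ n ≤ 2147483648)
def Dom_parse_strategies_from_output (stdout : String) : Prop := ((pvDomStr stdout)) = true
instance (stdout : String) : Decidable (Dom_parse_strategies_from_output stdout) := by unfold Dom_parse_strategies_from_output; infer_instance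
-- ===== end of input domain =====

-- B replaces A's per-line set-building loop with one lowercase of the whole string and a
-- single table-driven pass; equivalence is claimed on inputs where at most one keyword
-- occurs (outside that, A's list(set(...)) element order is accidental).

-- ===== PORT A =====
def parse_strategies_from_output (stdout : String) : List String :=
  let strategies : PySem.Set String := []
  let strategies := (PySem.Str.splitlines stdout).foldl (fun strategies line =>
    let lower := PySem.Str.lower line
    let strategies := if PySem.Str.isIn "steep" lower then PySem.Set.add strategies "steep_on_waste" else strategies
    let strategies := if PySem.Str.isIn "fence" lower then PySem.Set.add strategies "full_fence_scope" else strategies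
    let strategies := if PySem.Str.isIn "o&p" lower then PySem.Set.add strategies "O&P" else strategies
    if PySem.Str.isIn "f9" lower then PySem.Set.add strategies "f9_notes" else strategies) strategies
  strategies

-- ===== PORT B =====
def kwTable : List (String × String) :=
  [("steep", "steep_on_waste"), ("fence", "full_fence_scope"), ("o&p", "O&P"), ("f9", "f9_notes")]

def parse_strategies_from_output_alt (stdout : String) : List String :=
  let lower := PySem.Str.lower stdout
  kwTable.foldl (fun acc kv => if PySem.Str.isIn kv.1 lower then acc ++ [kv.2] else acc) []

-- ===== PRECONDITION & SPEC =====
-- Pre_ excludes inputs in which two or more of the four keywords occur: there A returns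
-- list(set(...)) whose element order is accidental (it varies with PYTHONHASHSEED).
def Pre_parse_strategies_from_output (stdout : String) : Prop :=
  ((if PySem.Str.isIn "steep" (PySem.Str.lower stdout) then 1 else 0) +
   (if PySem.Str.isIn "fence" (PySem.Str.lower stdout) then 1 else 0) +
   (if PySem.Str.isIn "o&p" (PySem.Str.lower stdout) then 1 else 0) +
   (if PySem.Str.isIn "f9" (PySem.Str.lower stdout) then 1 else 0) : Nat) ≤ 1
instance (stdout : String) : Decidable (Pre_parse_strategies_from_output stdout) := by
  unfold Pre_parse_strategies_from_output; infer_instance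

def pvWitness_parse_strategies_from_output : String := "Steep roof\nplain line"

def Spec_parse_strategies_from_output (stdout : String) (out : List String) : Prop := out = parse_strategies_from_output_alt stdout
instance (stdout : String) (out : List String) : Decidable (Spec_parse_strategies_from_output stdout out) := by unfold Spec_parse_strategies_from_output; infer_instance

-- ===== CLAIM (what is proved, stated in full; the proofs are below) =====
def Claim_equal_parse_strategies_from_output : Prop := ∀ (stdout : String), Dom_parse_strategies_from_output stdout → Pre_parse_strategies_from_output stdout → Spec_parse_strategies_from_output stdout (parse_strategies_from_output stdout)

-- ===== LEMMAS AND PROOFS =====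

-- the break predicate of PySem.Chars.splitlines, as a named function
def pyIsB (c : Char) : Bool :=
  decide (c.toNat = 10) || decide (c.toNat = 13) || decide (c.toNat = 11) || decide (c.toNat = 12) ||
  decide (c.toNat = 28) || decide (c.toNat = 29) || decide (c.toNat = 30) || decide (c.toNat = 133) ||
  decide (c.toNat = 8232) || decide (c.toNat = 8233)

-- accumulator-free reformulation of PySem.Chars.splitlines (proved equal below)
def myGo (s cur : List Char) : List (List Char) :=
  match s, cur with
  | [], cur => if cur = [] then [] else [cur]
  | '\x0d' :: '\n' :: rest, cur => cur :: myGo rest []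
  | c :: rest, cur => if pyIsB c then cur :: myGo rest [] else myGo rest (cur ++ [c])

lemma go_cons (isB : Char → Bool) (c : Char) (rest cur : List Char) (acc : List (List Char))
  (h : ∀ rest', c = '\x0d' → rest = '\n'::rest' → False) :
  PySem.Chars.splitlines.go isB (c::rest) cur acc =
    if isB c then PySem.Chars.splitlines.go isB rest [] (cur.reverse::acc)
    else PySem.Chars.splitlines.go isB rest (c::cur) acc := by
  rw [PySem.Chars.splitlines.go.eq_def]
  split
  next heq => simp at heq
  next rest' heq =>
    rw [List.cons_eq_cons] at heq
    exact (h rest' heq.1 heq.2).elim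
  next c' rest' _ heq =>
    rw [List.cons_eq_cons] at heq
    obtain ⟨hc, hr⟩ := heq
    subst hc; subst hr
    rfl

lemma go_nil (isB : Char → Bool) (cur : List Char) (acc : List (List Char)) :
  PySem.Chars.splitlines.go isB [] cur acc =
    if cur.isEmpty then acc.reverse else (cur.reverse :: acc).reverse := rfl

lemma go_crlf (isB : Char → Bool) (rest cur : List Char) (acc : List (List Char)) :
  PySem.Chars.splitlines.go isB ('\x0d'::'\n'::rest) cur acc =
    PySem.Chars.splitlines.go isB rest [] (cur.reverse :: acc) := rfl

lemma go_eq_myGo : ∀ (s cur : List Char) (acc : List (List Char)),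
    PySem.Chars.splitlines.go pyIsB s cur.reverse acc = acc.reverse ++ myGo s cur := by
  intro s cur
  induction s, cur using myGo.induct with
  | case1 => intro acc; simp [go_nil, myGo]
  | case2 cur h => intro acc; simp [go_nil, myGo, h, List.isEmpty_iff]
  | case3 rest cur ih =>
      intro acc
      rw [go_crlf]
      have := ih (cur :: acc)
      simp at this
      simp [myGo, this]
  | case4 c rest cur hne hb ih =>
      intro acc
      rw [go_cons _ _ _ _ _ hne]
      have := ih (cur :: acc)
      simp at this
      rw [myGo]
      · simp [hb, this]
      · exact hne
  | case5 c rest cur hne hb ih =>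
      intro acc
      rw [go_cons _ _ _ _ _ hne]
      have := ih acc
      simp at this
      rw [myGo]
      · rw [this]; simp [hb]
      · exact hne

lemma splitlines_eq_myGo (s : List Char) : PySem.Chars.splitlines s = myGo s [] := by
  have h : PySem.Chars.splitlines s = PySem.Chars.splitlines.go pyIsB s [] [] := rfl
  rw [h]
  have := go_eq_myGo s [] []
  simpa using this

lemma mem_myGo_infix : ∀ (s cur l : List Char), l ∈ myGo s cur → l <:+: cur ++ s := by
  intro s cur
  induction s, cur using myGo.induct with
  | case1 => intro l h; simp [myGo] at h
  | case2 cur hc => intro l h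
                    simp [myGo, hc] at h
                    subst h
                    simp
  | case3 rest cur ih =>
      intro l h
      rw [myGo] at h
      rcases List.mem_cons.mp h with h | h
      · subst h; exact ⟨[], '\x0d'::'\n'::rest, by simp⟩
      · have := ih l h
        simp at this
        exact this.trans ⟨cur ++ ['\x0d', '\n'], [], by simp⟩
  | case4 c rest cur hne hb ih =>
      intro l h
      rw [myGo] at h
      · rw [if_pos hb] at h
        rcases List.mem_cons.mp h with h | h
        · subst h; exact ⟨[], c::rest, by simp⟩
        · have := ih l h
          simp at this
          exact this.trans ⟨cur ++ [c], [], by simp⟩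
      · exact hne
  | case5 c rest cur hne hb ih =>
      intro l h
      rw [myGo] at h
      · rw [if_neg hb] at h
        have := ih l h
        simpa using this
      · exact hne

lemma prefix_of_prefix_append (k a b : List Char) (h : k <+: a ++ b) (hl : k.length ≤ a.length) :
    k <+: a := by
  have h1 : k = (a ++ b).take k.length := (List.prefix_iff_eq_take.mp h)
  rw [List.take_append_of_le_length hl] at h1
  rw [h1]
  exact List.take_prefix _ _

lemma infix_split (k : List Char) (c : Char) (hc : c ∉ k) :
    ∀ (a t : List Char), k <:+: a ++ c :: t → k <:+: a ∨ k <:+: t := by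
  intro a
  induction a with
  | nil =>
    intro t h
    simp at h
    rcases List.infix_cons_iff.mp h with hp | hi
    · cases k with
      | nil => exact Or.inl List.nil_infix
      | cons x ks =>
        have : x = c := (List.cons_prefix_cons.mp hp).1
        exact absurd (this ▸ List.mem_cons_self) hc
    · exact Or.inr hi
  | cons x a' ih =>
    intro t h
    rw [List.cons_append] at h
    rcases List.infix_cons_iff.mp h with hp | hi
    · left
      by_cases hlen : k.length ≤ (x :: a').length
      · exact (prefix_of_prefix_append k (x::a') (c::t) (by simpa using hp) hlen).isInfix
      · exfalso
        have hlt : (x :: a').length < k.length := Nat.lt_of_not_le hlen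
        have hget := hp.getElem (i := (x :: a').length) hlt
        have hck : k[(x :: a').length]'hlt = c := by rw [hget]; simp
        exact hc (hck ▸ List.getElem_mem hlt)
    · rcases ih t hi with h1 | h2
      · exact Or.inl (h1.trans (List.suffix_cons x a').isInfix)
      · exact Or.inr h2

lemma lowerChar_of_isB (c : Char) (h : pyIsB c = true) : PySem.Chars.lowerChar c = c := by
  have hup : PySem.Chars.isupper c = false := by
    simp only [pyIsB, Bool.or_eq_true, decide_eq_true_eq] at h
    simp only [PySem.Chars.isupper, Bool.and_eq_false_iff, decide_eq_false_iff_not, Char.le_def]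
    simp only [UInt32.le_iff_toNat_le]
    have ha : ('A'.val).toNat = 65 := rfl
    have hz : ('Z'.val).toNat = 90 := rfl
    have hc : c.toNat = c.val.toNat := rfl
    rw [ha, hz]
    rcases h with (((((((((h|h)|h)|h)|h)|h)|h)|h)|h)|h) <;> omega
  simp [PySem.Chars.lowerChar, hup]

lemma exists_line_of_infix_lower (k : List Char) (hk : k ≠ []) (hb : ∀ x ∈ k, pyIsB x = false) :
    ∀ (s cur : List Char), k <:+: PySem.Chars.lower (cur ++ s) →
      ∃ l ∈ myGo s cur, k <:+: PySem.Chars.lower l := by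
  intro s cur
  induction s, cur using myGo.induct with
  | case1 =>
    intro h
    simp [PySem.Chars.lower] at h
    exact absurd h hk
  | case2 cur hc =>
    intro h
    refine ⟨cur, by simp [myGo, hc], by simpa using h⟩
  | case3 rest cur ih =>
    intro h
    have hsplit : PySem.Chars.lower (cur ++ '\x0d' :: '\n' :: rest) =
        PySem.Chars.lower cur ++ '\x0d' :: '\n' :: PySem.Chars.lower rest := by
      simp [PySem.Chars.lower]
      constructor <;> decide
    rw [hsplit] at h
    rcases infix_split k '\x0d' (fun hm => by have := hb _ hm; simp [pyIsB] at this) _ _ h with h1 | h2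
    · exact ⟨cur, by simp [myGo], h1⟩
    · have h3 : k <:+: PySem.Chars.lower rest := by
        rcases List.infix_cons_iff.mp h2 with hp | hi
        · cases k with
          | nil => exact absurd rfl hk
          | cons x ks =>
            have hx : x = '\n' := (List.cons_prefix_cons.mp hp).1
            have := hb x List.mem_cons_self
            rw [hx] at this
            simp [pyIsB] at this
        · exact hi
      have := ih (by simpa using h3)
      obtain ⟨l, hl, hkl⟩ := this
      exact ⟨l, by rw [myGo]; exact List.mem_cons_of_mem _ hl, hkl⟩
  | case4 c rest cur hne hbc ih =>
    intro h
    have hlc : PySem.Chars.lowerChar c = c := lowerChar_of_isB c hbc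
    have hsplit : PySem.Chars.lower (cur ++ c :: rest) =
        PySem.Chars.lower cur ++ c :: PySem.Chars.lower rest := by
      simp [PySem.Chars.lower, hlc]
    rw [hsplit] at h
    rcases infix_split k c (fun hm => by have := hb _ hm; rw [hbc] at this; exact absurd this (by simp)) _ _ h with h1 | h2
    · refine ⟨cur, ?_, h1⟩
      rw [myGo]
      · rw [if_pos hbc]; exact List.mem_cons_self
      · exact hne
    · obtain ⟨l, hl, hkl⟩ := ih (by simpa using h2)
      refine ⟨l, ?_, hkl⟩
      rw [myGo]
      · rw [if_pos hbc]; exact List.mem_cons_of_mem _ hl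
      · exact hne
  | case5 c rest cur hne hbc ih =>
    intro h
    have h2 : k <:+: PySem.Chars.lower ((cur ++ [c]) ++ rest) := by
      simpa [List.append_assoc] using h
    obtain ⟨l, hl, hkl⟩ := ih h2
    refine ⟨l, ?_, hkl⟩
    rw [myGo]
    · rw [if_neg hbc]; exact hl
    · exact hne

lemma whole_of_line (kw stdout l : String) (hl : l ∈ PySem.Str.splitlines stdout)
    (h : PySem.Str.isIn kw (PySem.Str.lower l) = true) :
    PySem.Str.isIn kw (PySem.Str.lower stdout) = true := by
  rw [PySem.Str.isIn_iff_infix] at h ⊢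
  simp [PySem.Str.lower] at h ⊢
  have hmem : l.toList ∈ PySem.Chars.splitlines stdout.toList := by
    simp [PySem.Str.splitlines] at hl
    obtain ⟨cs, hcs, rfl⟩ := hl
    simpa using hcs
  rw [splitlines_eq_myGo] at hmem
  have hinf : l.toList <:+: stdout.toList := by
    simpa using mem_myGo_infix _ _ _ hmem
  exact h.trans (hinf.map _)

lemma line_of_whole (kw stdout : String) (hk : kw.toList ≠ [])
    (hb : ∀ x ∈ kw.toList, pyIsB x = false)
    (h : PySem.Str.isIn kw (PySem.Str.lower stdout) = true) :
    ∃ l ∈ PySem.Str.splitlines stdout, PySem.Str.isIn kw (PySem.Str.lower l) = true := by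
  rw [PySem.Str.isIn_iff_infix] at h
  simp [PySem.Str.lower] at h
  have h2 : kw.toList <:+: PySem.Chars.lower ([] ++ stdout.toList) := by simpa using h
  obtain ⟨l, hl, hkl⟩ := exists_line_of_infix_lower kw.toList hk hb stdout.toList [] h2
  rw [← splitlines_eq_myGo] at hl
  refine ⟨String.ofList l, ?_, ?_⟩
  · simp [PySem.Str.splitlines]
    exact ⟨l, hl, rfl⟩
  · rw [PySem.Str.isIn_iff_infix]
    simp [PySem.Str.lower]
    simpa using hkl

lemma foldl_add_stay (lines : List String) (p : String → Bool) (v : String) :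
    lines.foldl (fun st l => if p l then PySem.Set.add st v else st) ([v] : PySem.Set String) = [v] := by
  induction lines with
  | nil => rfl
  | cons l ls ih =>
    rw [List.foldl_cons]
    have : (if p l then PySem.Set.add [v] v else [v]) = [v] := by
      split <;> simp [PySem.Set.add]
    rw [this, ih]

lemma foldl_add_once (lines : List String) (p : String → Bool) (v : String)
    (h : ∃ l ∈ lines, p l = true) :
    lines.foldl (fun st l => if p l then PySem.Set.add st v else st) ([] : PySem.Set String) = [v] := by
  induction lines with
  | nil => simp at h
  | cons l ls ih =>
    rw [List.foldl_cons]
    by_cases hp : p l = true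
    · rw [if_pos hp]
      have : PySem.Set.add ([] : PySem.Set String) v = [v] := by simp [PySem.Set.add]
      rw [this]
      exact foldl_add_stay ls p v
    · rw [if_neg hp]
      apply ih
      rcases h with ⟨l', hl', hpl'⟩
      rcases List.mem_cons.mp hl' with rfl | hmem
      · exact absurd hpl' hp
      · exact ⟨l', hmem, hpl'⟩

-- per-keyword facts used in the verdict proof
lemma line_false_of_whole_false (kw stdout : String)
    (hw : PySem.Str.isIn kw (PySem.Str.lower stdout) = false) :
    ∀ l ∈ PySem.Str.splitlines stdout, PySem.Str.isIn kw (PySem.Str.lower l) = false := by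
  intro l hl
  by_contra hcon
  rw [Bool.not_eq_false] at hcon
  rw [whole_of_line kw stdout l hl hcon] at hw
  cases hw

-- A's loop when exactly the keyword kw fires somewhere and the other three never fire
lemma A_loop_single (stdout kw v : String)
    (hw : PySem.Str.isIn kw (PySem.Str.lower stdout) = true)
    (hk : kw.toList ≠ []) (hb : ∀ x ∈ kw.toList, pyIsB x = false) :
    (PySem.Str.splitlines stdout).foldl
        (fun st l => if PySem.Str.isIn kw (PySem.Str.lower l) then PySem.Set.add st v else st)
        ([] : PySem.Set String) = [v] := by
  obtain ⟨l, hl, hkl⟩ := line_of_whole kw stdout hk hb hw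
  exact foldl_add_once _ _ _ ⟨l, hl, hkl⟩

-- ===== VERDICT (by name: the statement is the Claim_ definition above) =====
set_option maxRecDepth 8192 in
set_option maxHeartbeats 2000000 in
theorem parse_strategies_from_output_spec : Claim_equal_parse_strategies_from_output := by
  intro stdout hdom hpre
  unfold Spec_parse_strategies_from_output
  by_cases b1 : PySem.Str.isIn "steep" (PySem.Str.lower stdout) = true <;>
  by_cases b2 : PySem.Str.isIn "fence" (PySem.Str.lower stdout) = true <;>
  by_cases b3 : PySem.Str.isIn "o&p" (PySem.Str.lower stdout) = true <;>
  by_cases b4 : PySem.Str.isIn "f9" (PySem.Str.lower stdout) = true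
  all_goals first
    | (exfalso
       unfold Pre_parse_strategies_from_output at hpre
       simp only [b1, b2, b3, b4, if_pos, if_neg, Bool.not_eq_true] at hpre; omega)
    | skip
  all_goals rw [Bool.not_eq_true] at *
  · have hf2 := line_false_of_whole_false _ _ b2
    have hf3 := line_false_of_whole_false _ _ b3
    have hf4 := line_false_of_whole_false _ _ b4
    have hA : parse_strategies_from_output stdout =
        (PySem.Str.splitlines stdout).foldl
          (fun st l => if PySem.Str.isIn "steep" (PySem.Str.lower l) then PySem.Set.add st "steep_on_waste" else st) [] := by
      simp only [parse_strategies_from_output]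
      apply PySem.List.foldl_congr_mem
      intro acc l hl
      have h2 := hf2 l hl; have h3 := hf3 l hl; have h4 := hf4 l hl
      simp [PySem.Str.isIn, PySem.Str.lower] at h2 h3 h4
      simp [PySem.Str.isIn, PySem.Str.lower, h2, h3, h4]
    rw [hA, A_loop_single stdout "steep" "steep_on_waste" (by assumption) (by decide) (by intro x hx; simp at hx; rcases hx with rfl|rfl|rfl|rfl <;> rfl)]
    have c1 := b1; have c2 := b2; have c3 := b3; have c4 := b4
    simp [PySem.Str.isIn, PySem.Str.lower] at c1 c2 c3 c4
    simp [parse_strategies_from_output_alt, kwTable, PySem.Str.isIn, PySem.Str.lower, c1, c2, c3, c4]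
  · have hf1 := line_false_of_whole_false _ _ b1
    have hf3 := line_false_of_whole_false _ _ b3
    have hf4 := line_false_of_whole_false _ _ b4
    have hA : parse_strategies_from_output stdout =
        (PySem.Str.splitlines stdout).foldl
          (fun st l => if PySem.Str.isIn "fence" (PySem.Str.lower l) then PySem.Set.add st "full_fence_scope" else st) [] := by
      simp only [parse_strategies_from_output]
      apply PySem.List.foldl_congr_mem
      intro acc l hl
      have h1 := hf1 l hl; have h3 := hf3 l hl; have h4 := hf4 l hl
      simp [PySem.Str.isIn, PySem.Str.lower] at h1 h3 h4
      simp [PySem.Str.isIn, PySem.Str.lower, h1, h3, h4]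
    rw [hA, A_loop_single stdout "fence" "full_fence_scope" (by assumption) (by decide) (by intro x hx; simp at hx; rcases hx with rfl|rfl|rfl|rfl|rfl <;> rfl)]
    have c1 := b1; have c2 := b2; have c3 := b3; have c4 := b4
    simp [PySem.Str.isIn, PySem.Str.lower] at c1 c2 c3 c4
    simp [parse_strategies_from_output_alt, kwTable, PySem.Str.isIn, PySem.Str.lower, c1, c2, c3, c4]
  · have hf1 := line_false_of_whole_false _ _ b1
    have hf2 := line_false_of_whole_false _ _ b2
    have hf4 := line_false_of_whole_false _ _ b4
    have hA : parse_strategies_from_output stdout =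
        (PySem.Str.splitlines stdout).foldl
          (fun st l => if PySem.Str.isIn "o&p" (PySem.Str.lower l) then PySem.Set.add st "O&P" else st) [] := by
      simp only [parse_strategies_from_output]
      apply PySem.List.foldl_congr_mem
      intro acc l hl
      have h1 := hf1 l hl; have h2 := hf2 l hl; have h4 := hf4 l hl
      simp [PySem.Str.isIn, PySem.Str.lower] at h1 h2 h4
      simp [PySem.Str.isIn, PySem.Str.lower, h1, h2, h4]
    rw [hA, A_loop_single stdout "o&p" "O&P" (by assumption) (by decide) (by intro x hx; simp at hx; rcases hx with rfl|rfl|rfl <;> rfl)]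
    have c1 := b1; have c2 := b2; have c3 := b3; have c4 := b4
    simp [PySem.Str.isIn, PySem.Str.lower] at c1 c2 c3 c4
    simp [parse_strategies_from_output_alt, kwTable, PySem.Str.isIn, PySem.Str.lower, c1, c2, c3, c4]
  · have hf1 := line_false_of_whole_false _ _ b1
    have hf2 := line_false_of_whole_false _ _ b2
    have hf3 := line_false_of_whole_false _ _ b3
    have hA : parse_strategies_from_output stdout =
        (PySem.Str.splitlines stdout).foldl
          (fun st l => if PySem.Str.isIn "f9" (PySem.Str.lower l) then PySem.Set.add st "f9_notes" else st) [] := by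
      simp only [parse_strategies_from_output]
      apply PySem.List.foldl_congr_mem
      intro acc l hl
      have h1 := hf1 l hl; have h2 := hf2 l hl; have h3 := hf3 l hl
      simp [PySem.Str.isIn, PySem.Str.lower] at h1 h2 h3
      simp [PySem.Str.isIn, PySem.Str.lower, h1, h2, h3]
    rw [hA, A_loop_single stdout "f9" "f9_notes" (by assumption) (by decide) (by intro x hx; simp at hx; rcases hx with rfl|rfl <;> rfl)]
    have c1 := b1; have c2 := b2; have c3 := b3; have c4 := b4
    simp [PySem.Str.isIn, PySem.Str.lower] at c1 c2 c3 c4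
    simp [parse_strategies_from_output_alt, kwTable, PySem.Str.isIn, PySem.Str.lower, c1, c2, c3, c4]
  · have hf1 := line_false_of_whole_false _ _ b1
    have hf2 := line_false_of_whole_false _ _ b2
    have hf3 := line_false_of_whole_false _ _ b3
    have hf4 := line_false_of_whole_false _ _ b4
    have hA : parse_strategies_from_output stdout =
        (PySem.Str.splitlines stdout).foldl (fun (st : List String) _ => st) [] := by
      simp only [parse_strategies_from_output]
      apply PySem.List.foldl_congr_mem
      intro acc l hl
      have h1 := hf1 l hl; have h2 := hf2 l hl; have h3 := hf3 l hl; have h4 := hf4 l hl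
      simp [PySem.Str.isIn, PySem.Str.lower] at h1 h2 h3 h4
      simp [PySem.Str.isIn, PySem.Str.lower, h1, h2, h3, h4]
    have hconst : ∀ (L : List String), L.foldl (fun (st : List String) _ => st) ([] : List String) = [] := by
      intro L; induction L with
      | nil => rfl
      | cons x xs ih => simp only [List.foldl_cons]; exact ih
    rw [hA, hconst]
    have c1 := b1; have c2 := b2; have c3 := b3; have c4 := b4
    simp [PySem.Str.isIn, PySem.Str.lower] at c1 c2 c3 c4
    simp [parse_strategies_from_output_alt, kwTable, PySem.Str.isIn, PySem.Str.lower, c1, c2, c3, c4]
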